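-- pv_equiv track=rewrite | github.com/mengyijia49/llaisys | python/llaisys/chat/cli.py | _user_turns
-- ===== SOURCE A (Python) =====
-- from typing import Dict, List, Optional, Tuple
--
-- def _user_turns(messages: List[Dict[str, str]]) -> List[Tuple[int, int, Optional[int]]]:
--     turns: List[Tuple[int, int, Optional[int]]] = []
--     turn_no = 0
--     idx = 0
--     while idx < len(messages):
--         role = messages[idx]["role"]
--         if role == "system":
--             idx += 1
--             continue
--         if role != "user":
--             idx += 1
--             continue
--         turn_no += 1
--         assistant_idx = idx + 1 if idx + 1 < len(messages) and messages[idx + 1]["role"] == "assistant" else None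
--         turns.append((turn_no, idx, assistant_idx))
--         idx = idx + 2 if assistant_idx is not None else idx + 1
--     return turns
-- ===== SOURCE B (Python) =====
-- from typing import Dict, List, Optional, Tuple
--
-- def _user_turns(messages: List[Dict[str, str]]) -> List[Tuple[int, int, Optional[int]]]:
--     # Pass 1: index of user-message positions; Pass 2: shape each turn with its lookahead.
--     user_indices = [i for i, m in enumerate(messages) if m["role"] == "user"]
--     return [
--         (n + 1, i, i + 1 if i + 1 < len(messages) and messages[i + 1]["role"] == "assistant" else None)
--         for n, i in enumerate(user_indices)
--     ]
-- ===== Notes on version B (the rewrite author's own statement) =====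
-- stated objective: simpler
-- what changed: Replaces A's single variable-step while loop (which manually skips a paired assistant message) with a two-phase decomposition: one pass building the list of user-message indices, then a map producing each numbered turn with its assistant lookahead.
import Mathlib
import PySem

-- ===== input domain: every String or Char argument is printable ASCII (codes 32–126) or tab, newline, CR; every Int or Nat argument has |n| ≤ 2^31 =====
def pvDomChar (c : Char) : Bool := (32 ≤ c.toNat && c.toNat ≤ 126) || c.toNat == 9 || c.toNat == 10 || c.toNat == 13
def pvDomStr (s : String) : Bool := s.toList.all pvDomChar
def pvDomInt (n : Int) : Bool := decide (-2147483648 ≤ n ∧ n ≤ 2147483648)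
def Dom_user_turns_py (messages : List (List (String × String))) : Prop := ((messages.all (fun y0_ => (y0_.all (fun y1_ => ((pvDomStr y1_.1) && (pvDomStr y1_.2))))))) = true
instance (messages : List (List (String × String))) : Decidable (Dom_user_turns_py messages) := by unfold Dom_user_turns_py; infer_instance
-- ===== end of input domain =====

-- B is a simpler two-phase decomposition (index user positions, then map); equal return value on Pre_.

-- shared lookup helper: m["role"] with first-match association-list semantics (total via default "")
def pyRole (m : List (String × String)) : String :=
  ((m.find? (fun p => p.1 == "role")).map (fun p => p.2)).getD ""

-- ===== PORT A =====
def userTurnsAux (messages : List (List (String × String))) (idx : Nat) (turn_no : Int) :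
    List (Int × Int × Option Int) :=
  if h : idx < messages.length then
    let role := pyRole messages[idx]
    if role == "system" then userTurnsAux messages (idx+1) turn_no
    else if !(role == "user") then userTurnsAux messages (idx+1) turn_no
    else
      let turn_no' := turn_no + 1
      let assistant_idx : Option Int :=
        if h2 : idx + 1 < messages.length then
          (if pyRole messages[idx+1] == "assistant" then some ((idx : Int) + 1) else none)
        else none
      (turn_no', (idx : Int), assistant_idx) ::
        (if assistant_idx.isSome then userTurnsAux messages (idx+2) turn_no'
         else userTurnsAux messages (idx+1) turn_no')
  else []
termination_by messages.length - idx

def user_turns_py (messages : List (List (String × String))) : List (Int × Int × Option Int) :=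
  userTurnsAux messages 0 0

-- ===== PORT B =====
-- lookahead: 'i + 1 if i + 1 < len(messages) and messages[i+1]["role"] == "assistant" else None'
def aidxOf (messages : List (List (String × String))) (i : Int) : Option Int :=
  if i + 1 < (messages.length : Int) && (pyRole (PySem.List.pyGetD messages (i+1) []) == "assistant")
  then some (i + 1) else none

def user_turns_py_alt (messages : List (List (String × String))) : List (Int × Int × Option Int) :=
  let user_indices : List Int :=
    ((PySem.List.enumerate messages 0).filter (fun p => pyRole p.2 == "user")).map (fun p => p.1)
  (PySem.List.enumerate user_indices 0).map (fun q => (q.1 + 1, q.2, aidxOf messages q.2))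

-- ===== PRECONDITION & SPEC =====
-- Pre_ excludes inputs where some message dict has no "role" key: there A (and B) raise KeyError.
def Pre_user_turns_py (messages : List (List (String × String))) : Prop :=
  ∀ m ∈ messages, m.any (fun p => p.1 == "role") = true
instance (messages : List (List (String × String))) : Decidable (Pre_user_turns_py messages) := by
  unfold Pre_user_turns_py; infer_instance

def pvWitness_user_turns_py : (List (List (String × String))) :=
  [[("role", "system")], [("role", "user")], [("role", "assistant")], [("role", "user")]]

def Spec_user_turns_py (messages : List (List (String × String))) (out : List (Int × Int × Option Int)) : Prop := out = user_turns_py_alt messages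
instance (messages : List (List (String × String))) (out : List (Int × Int × Option Int)) : Decidable (Spec_user_turns_py messages out) := by unfold Spec_user_turns_py; infer_instance

-- ===== CLAIM (what is proved, stated in full; the proofs are below) =====
def Claim_equal_user_turns_py : Prop := ∀ (messages : List (List (String × String))), Dom_user_turns_py messages → Pre_user_turns_py messages → Spec_user_turns_py messages (user_turns_py messages)

-- ===== LEMMAS AND PROOFS =====

-- the list of user-message indices (phase 1 of B)
def userIdx (messages : List (List (String × String))) : List Int :=
  ((PySem.List.enumerate messages 0).filter (fun p => pyRole p.2 == "user")).map (fun p => p.1)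

-- the numbered-turn builder (what phase 2 of B computes, as a recursion)
def buildTurns (messages : List (List (String × String))) : Int → List Int → List (Int × Int × Option Int)
  | _, [] => []
  | tn, i :: t => (tn + 1, i, aidxOf messages i) :: buildTurns messages (tn + 1) t

lemma map_enumerate_eq_buildTurns (messages : List (List (String × String))) :
    ∀ (l : List Int) (s : Int),
      (PySem.List.enumerate l s).map (fun q => (q.1 + 1, q.2, aidxOf messages q.2))
        = buildTurns messages s l := by
  intro l
  induction l with
  | nil => intro s; simp [PySem.List.enumerate_nil, buildTurns]
  | cons i t ih => intro s; simp [PySem.List.enumerate_cons, buildTurns, ih]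

lemma mem_userIdx (messages : List (List (String × String))) (j : Int) :
    j ∈ userIdx messages ↔
      ∃ (k : Nat) (h : k < messages.length), j = (k : Int) ∧ pyRole messages[k] = "user" := by
  simp only [userIdx, List.mem_map, List.mem_filter]
  constructor
  · rintro ⟨p, ⟨hp, hrole⟩, rfl⟩
    rw [PySem.List.mem_enumerate_iff] at hp
    obtain ⟨k, hk, rfl⟩ := hp
    exact ⟨k, hk, by simp, by simpa using hrole⟩
  · rintro ⟨k, hk, rfl, hrole⟩
    refine ⟨((k : Int), messages[k]), ⟨?_, by simpa using hrole⟩, by simp⟩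
    rw [PySem.List.mem_enumerate_iff]
    exact ⟨k, hk, by simp⟩

lemma pairwise_userIdx (messages : List (List (String × String))) :
    (userIdx messages).Pairwise (· < ·) := by
  have h := PySem.List.pairwise_lt_enumerate (xs := messages) (s := 0)
  unfold userIdx
  rw [List.pairwise_map]
  exact (h.filter _)

lemma filter_step_not_mem (U : List Int) (a : Int) (h : a ∉ U) :
    U.filter (fun j => a ≤ j) = U.filter (fun j => a + 1 ≤ j) := by
  apply List.filter_congr
  intro j hj
  have : j ≠ a := fun e => h (e ▸ hj)
  simp only [decide_eq_decide]
  omega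

lemma filter_step_mem (U : List Int) (a : Int) (hs : U.Pairwise (· < ·)) (h : a ∈ U) :
    U.filter (fun j => a ≤ j) = a :: U.filter (fun j => a + 1 ≤ j) := by
  induction U with
  | nil => cases h
  | cons b t ih =>
    have hbt := List.pairwise_cons.mp hs
    rcases List.mem_cons.mp h with heq | hat
    · subst heq
      simp only [List.filter_cons, decide_eq_true_eq]
      rw [if_pos le_rfl, if_neg (by omega)]
      congr 1
      apply List.filter_congr
      intro j hj
      have := hbt.1 j hj
      simp only [decide_eq_decide]
      omega
    · have hba : b < a := hbt.1 a hat
      simp only [List.filter_cons, decide_eq_true_eq]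
      rw [if_neg (by omega), if_neg (by omega)]
      exact ih hbt.2 hat

lemma filter_ge_len (messages : List (List (String × String))) (idx : Nat)
    (h : ¬ idx < messages.length) :
    (userIdx messages).filter (fun j => (idx : Int) ≤ j) = [] := by
  rw [List.filter_eq_nil_iff]
  intro j hj
  obtain ⟨k, hk, rfl, _⟩ := (mem_userIdx messages j).mp hj
  simp only [decide_eq_true_eq]
  omega

lemma aidxOf_eq (messages : List (List (String × String))) (idx : Nat) :
    aidxOf messages (idx : Int) =
      (if h2 : idx + 1 < messages.length then
        (if pyRole messages[idx+1] == "assistant" then some ((idx : Int) + 1) else none)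
      else none) := by
  unfold aidxOf
  by_cases h2 : idx + 1 < messages.length
  · rw [dif_pos h2]
    have hget : PySem.List.pyGetD messages ((idx : Int) + 1) [] = messages[idx+1] := by
      have he : ((idx : Int) + 1) = ((idx + 1 : Nat) : Int) := by push_cast; ring
      rw [he, PySem.List.pyGetD_natCast]
      simp [List.getD, h2]
    rw [hget]
    have hlt : (idx : Int) + 1 < (messages.length : Int) := by omega
    simp [hlt]
  · rw [dif_neg h2]
    have hlt : ¬ ((idx : Int) + 1 < (messages.length : Int)) := by omega
    simp [hlt]

lemma filter_cast_succ (U : List Int) (idx : Nat) :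
    U.filter (fun j => ((idx + 1 : Nat) : Int) ≤ j) = U.filter (fun j => (idx : Int) + 1 ≤ j) := by
  apply List.filter_congr; intro j _; simp only [decide_eq_decide]; push_cast; omega

lemma userTurnsAux_eq_buildTurns (messages : List (List (String × String))) (idx : Nat) (tn : Int) :
      userTurnsAux messages idx tn
        = buildTurns messages tn ((userIdx messages).filter (fun j => (idx : Int) ≤ j)) := by
  rw [userTurnsAux]
  by_cases h : idx < messages.length
  · rw [dif_pos h]
    have hnotuser : ∀ (k : Nat) (hk : k < messages.length), pyRole messages[k] ≠ "user" →
        (k : Int) ∉ userIdx messages := by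
      intro k hk hne hmem
      obtain ⟨k', hk', he, hrole⟩ := (mem_userIdx messages _).mp hmem
      have : k' = k := by omega
      exact hne (this ▸ hrole)
    by_cases hsys : pyRole messages[idx] == "system"
    · rw [if_pos hsys]
      have hrole : pyRole messages[idx] ≠ "user" := by
        have := of_decide_eq_true hsys; rw [this]; decide
      rw [userTurnsAux_eq_buildTurns messages (idx+1), filter_cast_succ,
        filter_step_not_mem _ _ (hnotuser idx h hrole)]
    · rw [if_neg hsys]
      by_cases huser : pyRole messages[idx] == "user"
      · rw [if_neg (by simp [huser])]
        have hmem : (idx : Int) ∈ userIdx messages :=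
          (mem_userIdx messages _).mpr ⟨idx, h, rfl, of_decide_eq_true huser⟩
        rw [filter_step_mem _ _ (pairwise_userIdx messages) hmem]
        rw [buildTurns]
        rw [← aidxOf_eq]
        show ((tn + 1, (idx : Int), aidxOf messages (idx : Int)) ::
          (if (aidxOf messages (idx : Int)).isSome then userTurnsAux messages (idx+2) (tn+1)
           else userTurnsAux messages (idx+1) (tn+1))) = _
        congr 1
        by_cases hsome : (aidxOf messages (idx : Int)).isSome
        · rw [if_pos hsome]
          -- the next message is an assistant, hence not a user index
          have h2 : idx + 1 < messages.length := by
            by_contra h2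
            rw [aidxOf_eq, dif_neg h2] at hsome
            simp at hsome
          have hassist : pyRole messages[idx+1] = "assistant" := by
            rw [aidxOf_eq, dif_pos h2] at hsome
            by_cases ha : pyRole messages[idx+1] == "assistant"
            · exact of_decide_eq_true ha
            · rw [if_neg ha] at hsome; simp at hsome
          have hna : ((idx : Int) + 1) ∉ userIdx messages := by
            have := hnotuser _ h2 (by rw [hassist]; decide)
            push_cast at this
            exact this
          rw [userTurnsAux_eq_buildTurns messages (idx+2)]
          have e2 : (userIdx messages).filter (fun j => ((idx + 2 : Nat) : Int) ≤ j)
              = (userIdx messages).filter (fun j => (idx : Int) + 1 + 1 ≤ j) := by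
            apply List.filter_congr; intro j _; simp only [decide_eq_decide]; push_cast; omega
          rw [e2, filter_step_not_mem _ _ hna]
        · rw [if_neg hsome, userTurnsAux_eq_buildTurns messages (idx+1), filter_cast_succ]
      · rw [if_pos (by simp [huser])]
        have hrole : pyRole messages[idx] ≠ "user" := fun e => huser (by simp [e])
        rw [userTurnsAux_eq_buildTurns messages (idx+1), filter_cast_succ,
          filter_step_not_mem _ _ (hnotuser idx h hrole)]
  · rw [dif_neg h, filter_ge_len messages idx h, buildTurns]
termination_by messages.length - idx
decreasing_by all_goals omega

lemma alt_eq_buildTurns (messages : List (List (String × String))) :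
    user_turns_py_alt messages = buildTurns messages 0 (userIdx messages) := by
  unfold user_turns_py_alt
  rw [map_enumerate_eq_buildTurns]
  rfl

-- ===== VERDICT (by name: the statement is the Claim_ definition above) =====
theorem user_turns_py_spec : Claim_equal_user_turns_py := by
  intro messages _ _
  unfold Spec_user_turns_py
  rw [alt_eq_buildTurns]
  unfold user_turns_py
  rw [userTurnsAux_eq_buildTurns messages 0 0]
  congr 1
  have : (userIdx messages).filter (fun j => ((0 : Nat) : Int) ≤ j) = userIdx messages := by
    apply List.filter_eq_self.mpr
    intro j hj
    obtain ⟨k, hk, rfl, _⟩ := (mem_userIdx messages j).mp hj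
    simp
  simpa using this
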